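-- pv_equiv track=rewrite | github.com/Xinginn/advent2021 | day_03/part02.py | filter_carbon
-- ===== SOURCE A (Python) =====
-- def filter_carbon (source_car, position):
--   ones = []
--   zeroes = []
--   for line in source_car:
--     if line[position] == "1":
--       ones.append(line)
--     else:
--       zeroes.append(line)
--   return ones if len(ones) < len(zeroes) else zeroes
-- ===== SOURCE B (Python) =====
-- def filter_carbon(source_car, position):
--     source = list(source_car)
--     ones_count = sum(1 for line in source if line[position] == "1")
--     keep_ones = ones_count < len(source) - ones_count
--     return [line for line in source if (line[position] == "1") == keep_ones]
-- ===== Notes on version B (the rewrite author's own statement) =====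
-- stated objective: simpler
-- what changed: Instead of building two parallel lists in one pass, B counts the lines whose bit at position is '1', decides once which side to keep (ties keep the non-'1' side, as A does), and produces the result with a single filter pass.
import Mathlib
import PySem

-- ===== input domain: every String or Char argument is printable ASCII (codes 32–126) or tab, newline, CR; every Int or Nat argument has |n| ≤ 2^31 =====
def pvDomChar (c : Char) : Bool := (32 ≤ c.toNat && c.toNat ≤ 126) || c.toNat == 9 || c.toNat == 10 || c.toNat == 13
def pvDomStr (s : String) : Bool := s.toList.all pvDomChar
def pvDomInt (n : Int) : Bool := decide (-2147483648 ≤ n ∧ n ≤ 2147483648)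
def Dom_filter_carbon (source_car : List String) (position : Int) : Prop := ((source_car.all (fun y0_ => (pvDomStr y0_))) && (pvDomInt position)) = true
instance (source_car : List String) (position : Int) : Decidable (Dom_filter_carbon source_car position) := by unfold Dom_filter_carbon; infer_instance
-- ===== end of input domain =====

-- B counts the ones once and emits the kept side with a single filter pass; objective: simpler (same O(n) cost).

-- ===== PORT A =====
def filter_carbon (source_car : List String) (position : Int) : List String :=
  let p := source_car.foldl
    (fun (acc : List String × List String) line =>
      if PySem.Str.pyGet? line position == some '1' then (acc.1 ++ [line], acc.2)
      else (acc.1, acc.2 ++ [line]))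
    ([], [])
  if p.1.length < p.2.length then p.1 else p.2

-- ===== PORT B =====
def filter_carbon_alt (source_car : List String) (position : Int) : List String :=
  let onesCount := source_car.countP (fun line => PySem.Str.pyGet? line position == some '1')
  let keepOnes := decide ((onesCount : Int) < (source_car.length : Int) - (onesCount : Int))
  source_car.filter (fun line => (PySem.Str.pyGet? line position == some '1') == keepOnes)

-- ===== PRECONDITION & SPEC =====
-- Pre_ excludes exactly the inputs on which A raises IndexError (some line too short for position).
def Pre_filter_carbon (source_car : List String) (position : Int) : Prop :=
  ∀ line ∈ source_car, PySem.Raise.InRange line.toList.length position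
instance (source_car : List String) (position : Int) : Decidable (Pre_filter_carbon source_car position) := by unfold Pre_filter_carbon; infer_instance
def pvWitness_filter_carbon : List String × Int := (["10", "01", "11"], 0)
def Spec_filter_carbon (source_car : List String) (position : Int) (out : List String) : Prop := out = filter_carbon_alt source_car position
instance (source_car : List String) (position : Int) (out : List String) : Decidable (Spec_filter_carbon source_car position out) := by unfold Spec_filter_carbon; infer_instance

-- ===== CLAIM (what is proved, stated in full; the proofs are below) =====
def Claim_equal_filter_carbon : Prop := ∀ (source_car : List String) (position : Int), Dom_filter_carbon source_car position → Pre_filter_carbon source_car position → Spec_filter_carbon source_car position (filter_carbon source_car position)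

-- ===== LEMMAS AND PROOFS =====

/-- A's fold is the pair of the two filters, modulo the accumulators. -/
theorem pv_fold_eq (src : List String) (q : String → Bool) (o z : List String) :
    src.foldl (fun (acc : List String × List String) line =>
        if q line then (acc.1 ++ [line], acc.2) else (acc.1, acc.2 ++ [line])) (o, z)
      = (o ++ src.filter q, z ++ src.filter (fun l => ! q l)) := by
  induction src generalizing o z with
  | nil => simp
  | cons x xs ih =>
    by_cases h : q x <;> simp [h, ih]

/-- The "smaller side" choice equals one filter driven by the count comparison. -/
theorem pv_choice_eq (src : List String) (q : String → Bool) :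
    (if (src.filter q).length < (src.filter (fun l => ! q l)).length
      then src.filter q else src.filter (fun l => ! q l))
    = src.filter (fun l =>
        q l == decide ((src.countP q : Int) < (src.length : Int) - (src.countP q : Int))) := by
  have hc : (src.filter q).length = src.countP q := (List.countP_eq_length_filter ..).symm
  have hc' : (src.filter (fun l => ! q l)).length = src.countP (fun l => ! q l) :=
    (List.countP_eq_length_filter ..).symm
  have hsum : src.length = src.countP q + src.countP (fun l => ! q l) := by
    have := List.length_eq_countP_add_countP (p := q) (l := src)
    simpa using this
  by_cases h : (src.filter q).length < (src.filter (fun l => ! q l)).length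
  · have hk : decide ((src.countP q : Int) < (src.length : Int) - (src.countP q : Int)) = true := by
      simp only [decide_eq_true_eq]; omega
    rw [if_pos h, hk]
    exact (List.filter_congr (fun l _ => by cases q l <;> simp)).symm
  · have hk : decide ((src.countP q : Int) < (src.length : Int) - (src.countP q : Int)) = false := by
      simp only [decide_eq_false_iff_not]; omega
    rw [if_neg h, hk]
    exact (List.filter_congr (fun l _ => by cases q l <;> simp)).symm

theorem filter_carbon_spec : Claim_equal_filter_carbon := by
  intro src position _ _
  unfold Spec_filter_carbon filter_carbon filter_carbon_alt
  simp only [pv_fold_eq, List.nil_append]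
  exact pv_choice_eq src (fun line => PySem.Str.pyGet? line position == some '1')

-- ===== VERDICT (by name: the statement is the Claim_ definition above) =====
-- (theorem filter_carbon_spec above is the verdict)
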